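-- pv_equiv track=rewrite | github.com/nesterus/mpia | decompose_compose/scene_composer.py | _split_canvas2d
-- ===== SOURCE A (Python) =====
-- import math
--
-- def _split_canvas2d(h_background, w_background, num_objs):
--     y0_center_list = list()
--     x0_center_list = list()
--
--     num_cells_w = int(math.sqrt(num_objs - 1) + 1)
--     num_cells_h = math.ceil(num_objs / num_cells_w)
--
--     cell_width = w_background // num_cells_w
--     cell_height = h_background // num_cells_h
--
--     for ind in range(num_objs):
--         row_idx = ind // num_cells_w
--         col_idx = ind % num_cells_w
--
--         y0_center_list.append((row_idx * cell_height) + (cell_height // 2))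
--         x0_center_list.append((col_idx * cell_width) + (cell_width // 2))
--
--     return y0_center_list, x0_center_list, cell_height, cell_width
-- ===== SOURCE B (Python) =====
-- import math
--
-- def _split_canvas2d(h_background, w_background, num_objs):
--     # Same grid sizing, but nested row/column loops with incremental
--     # coordinates and an early break -- no per-index div/mod.
--     num_cells_w = math.isqrt(num_objs - 1) + 1
--     num_cells_h = -((-num_objs) // num_cells_w)
--
--     cell_width = w_background // num_cells_w
--     cell_height = h_background // num_cells_h
--
--     y0_center_list = []
--     x0_center_list = []
--     count = 0
--     for row in range(num_cells_h):
--         if count >= num_objs: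
--             break
--         y = row * cell_height + cell_height // 2
--         for col in range(num_cells_w):
--             if count >= num_objs:
--                 break
--             y0_center_list.append(y)
--             x0_center_list.append(col * cell_width + cell_width // 2)
--             count += 1
--
--     return y0_center_list, x0_center_list, cell_height, cell_width
-- ===== Notes on version B (the rewrite author's own statement) =====
-- stated objective: alternative
-- what changed: Replaces A's single flat loop that derives row/column via per-index floor-division and modulo with nested row and column loops that carry incremental coordinates and a running counter with early break.
import Mathlib
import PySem

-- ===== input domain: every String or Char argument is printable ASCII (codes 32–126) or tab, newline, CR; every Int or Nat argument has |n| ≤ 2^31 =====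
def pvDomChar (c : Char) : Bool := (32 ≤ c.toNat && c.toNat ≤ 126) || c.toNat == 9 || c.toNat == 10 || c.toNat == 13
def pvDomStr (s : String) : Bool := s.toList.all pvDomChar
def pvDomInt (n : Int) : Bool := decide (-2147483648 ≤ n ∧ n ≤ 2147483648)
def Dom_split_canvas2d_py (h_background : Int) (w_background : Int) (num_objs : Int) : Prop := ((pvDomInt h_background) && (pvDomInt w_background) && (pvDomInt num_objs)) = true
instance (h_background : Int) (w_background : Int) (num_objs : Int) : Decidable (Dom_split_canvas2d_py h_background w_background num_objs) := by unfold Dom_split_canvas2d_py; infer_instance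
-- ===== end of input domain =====

-- B replaces A's flat index loop with per-index div/mod by nested row/column loops with
-- incremental coordinates and an early break (a different decomposition; no speed claim).

-- ===== PORT A =====
-- int(math.sqrt(num_objs - 1) + 1): on the stated domain (num_objs ≥ 1, num_objs ≤ 2^31)
-- the float sqrt is exact enough that this equals isqrt(num_objs - 1) + 1 (ported by hand, exact there).
-- math.ceil(num_objs / num_cells_w): exact ceiling division on the stated domain, ported as -((-n) // w).
def split_canvas2d_py (h_background : Int) (w_background : Int) (num_objs : Int) : List Int × List Int × Int × Int :=
  let num_cells_w : Int := ((num_objs - 1).toNat.sqrt : Int) + 1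
  let num_cells_h : Int := -(PySem.Int.floordiv (-num_objs) num_cells_w)
  let cell_width : Int := PySem.Int.floordiv w_background num_cells_w
  let cell_height : Int := PySem.Int.floordiv h_background num_cells_h
  let st := (PySem.List.pyRange 0 num_objs 1).foldl
    (fun (st : List Int × List Int) ind =>
      let row_idx := PySem.Int.floordiv ind num_cells_w
      let col_idx := PySem.Int.mod ind num_cells_w
      (st.1 ++ [row_idx * cell_height + PySem.Int.floordiv cell_height 2],
       st.2 ++ [col_idx * cell_width + PySem.Int.floordiv cell_width 2]))
    ([], [])
  (st.1, st.2, cell_height, cell_width)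

-- ===== PORT B =====
-- inner 'for col in range(num_cells_w)' with 'if count >= num_objs: break'
def pvInnerB (n cw y : Int) : List Int → Int → List Int → List Int → List Int × List Int × Int
  | [], c, ys, xs => (ys, xs, c)
  | col :: rest, c, ys, xs =>
      if n ≤ c then (ys, xs, c)
      else pvInnerB n cw y rest (c + 1) (ys ++ [y]) (xs ++ [col * cw + PySem.Int.floordiv cw 2])

-- outer 'for row in range(num_cells_h)' with 'if count >= num_objs: break'
def pvOuterB (n cw ch W : Int) : List Int → Int → List Int → List Int → List Int × List Int
  | [], _, ys, xs => (ys, xs)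
  | row :: rest, c, ys, xs =>
      if n ≤ c then (ys, xs)
      else
        match pvInnerB n cw (row * ch + PySem.Int.floordiv ch 2) (PySem.List.pyRange 0 W 1) c ys xs with
        | (ys', xs', c') => pvOuterB n cw ch W rest c' ys' xs' 

def split_canvas2d_py_alt (h_background : Int) (w_background : Int) (num_objs : Int) : List Int × List Int × Int × Int :=
  let num_cells_w : Int := ((num_objs - 1).toNat.sqrt : Int) + 1
  let num_cells_h : Int := -(PySem.Int.floordiv (-num_objs) num_cells_w)
  let cell_width : Int := PySem.Int.floordiv w_background num_cells_w
  let cell_height : Int := PySem.Int.floordiv h_background num_cells_h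
  let st := pvOuterB num_objs cell_width cell_height num_cells_w
      (PySem.List.pyRange 0 num_cells_h 1) 0 [] []
  (st.1, st.2, cell_height, cell_width)

-- ===== PRECONDITION & SPEC =====
-- Pre_ excludes num_objs ≤ 0, on which A raises ValueError (math.sqrt of a negative number).
def Pre_split_canvas2d_py (h_background : Int) (w_background : Int) (num_objs : Int) : Prop := 1 ≤ num_objs
instance (h_background : Int) (w_background : Int) (num_objs : Int) : Decidable (Pre_split_canvas2d_py h_background w_background num_objs) := by unfold Pre_split_canvas2d_py; infer_instance
def pvWitness_split_canvas2d_py : Int × Int × Int := (10, 12, 5)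
def Spec_split_canvas2d_py (h_background : Int) (w_background : Int) (num_objs : Int) (out : List Int × List Int × Int × Int) : Prop := out = split_canvas2d_py_alt h_background w_background num_objs
instance (h_background : Int) (w_background : Int) (num_objs : Int) (out : List Int × List Int × Int × Int) : Decidable (Spec_split_canvas2d_py h_background w_background num_objs out) := by unfold Spec_split_canvas2d_py; infer_instance

-- ===== CLAIM (what is proved, stated in full; the proofs are below) =====
def Claim_equal_split_canvas2d_py : Prop := ∀ (h_background : Int) (w_background : Int) (num_objs : Int), Dom_split_canvas2d_py h_background w_background num_objs → Pre_split_canvas2d_py h_background w_background num_objs → Spec_split_canvas2d_py h_background w_background num_objs (split_canvas2d_py h_background w_background num_objs)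

-- ===== LEMMAS AND PROOFS =====

-- A's loop appends to both lists: it is the pair of maps over the index range.
theorem pv_foldl_pair (f g : Int → Int) (l : List Int) (ys xs : List Int) :
    l.foldl (fun (st : List Int × List Int) i => (st.1 ++ [f i], st.2 ++ [g i])) (ys, xs)
      = (ys ++ l.map f, xs ++ l.map g) := by
  induction l generalizing ys xs with
  | nil => simp
  | cons a t ih => simp [List.foldl_cons, ih]

-- Inner loop invariant: starting at count c = r*W + j (0 ≤ j, j + m = W, c ≤ n), the inner
-- loop emits exactly the centers of indices c .. min n (r*W + W) and stops with that count.
theorem pv_inner_spec (n W cw ch : Int) (hW : 0 < W) (r : Int) (m : Nat) :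
    ∀ (j c : Int), j + m = W → 0 ≤ j → c = r * W + j → c ≤ n → ∀ (ys xs : List Int),
      pvInnerB n cw (r * ch + PySem.Int.floordiv ch 2) (PySem.List.pyRange j W 1) c ys xs
        = (ys ++ (PySem.List.pyRange c (min n (r * W + W)) 1).map
              (fun i => PySem.Int.floordiv i W * ch + PySem.Int.floordiv ch 2),
           xs ++ (PySem.List.pyRange c (min n (r * W + W)) 1).map
              (fun i => PySem.Int.mod i W * cw + PySem.Int.floordiv cw 2),
           min n (r * W + W)) := by
  induction m with
  | zero =>
      intro j c hm hj hc hcn ys xs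
      rw [PySem.List.pyRange_one_eq_nil (by omega : W ≤ j)]
      have h2 : min n (r * W + W) = c := by omega
      rw [h2, PySem.List.pyRange_one_eq_nil (le_refl c)]
      simp [pvInnerB]
  | succ m ih =>
      intro j c hm hj hc hcn ys xs
      have hjW : j < W := by push_cast at hm; omega
      rw [PySem.List.pyRange_one_cons hjW]
      by_cases hbr : n ≤ c
      · have hcn' : c = n := le_antisymm hcn hbr
        have : min n (r * W + W) = c := by omega
        rw [pvInnerB, if_pos hbr, this, PySem.List.pyRange_one_eq_nil (le_refl c)]
        simp
      · push_neg at hbr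
        rw [pvInnerB, if_neg (by omega)]
        have hdiv : PySem.Int.floordiv c W = r := by
          rw [PySem.Int.floordiv_eq_iff_of_pos hW]; constructor <;> nlinarith
        have hmod : PySem.Int.mod c W = j := by
          have := PySem.Int.floordiv_mul_add_mod c W
          rw [hdiv] at this; omega
        have hce : c < min n (r * W + W) := by
          have : c < r * W + W := by omega
          omega
        rw [ih (j + 1) (c + 1) (by push_cast; omega) (by omega) (by omega) (by omega)]
        rw [PySem.List.pyRange_one_cons hce]
        simp [hdiv, hmod, mul_comm]
  termination_by m

-- Outer loop invariant: entering with rows r .. H-1 and count min n (r*W), the rest of the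
-- run emits the centers of indices min n (r*W) .. n.
theorem pv_outer_spec (n W cw ch H : Int) (hW : 0 < W)
    (hH1 : (H - 1) * W < n) (hH2 : n ≤ H * W) (k : Nat) :
    ∀ (r : Int), r + k = H → 0 ≤ r → ∀ (ys xs : List Int),
      pvOuterB n cw ch W (PySem.List.pyRange r H 1) (min n (r * W)) ys xs
        = (ys ++ (PySem.List.pyRange (min n (r * W)) n 1).map
              (fun i => PySem.Int.floordiv i W * ch + PySem.Int.floordiv ch 2),
           xs ++ (PySem.List.pyRange (min n (r * W)) n 1).map
              (fun i => PySem.Int.mod i W * cw + PySem.Int.floordiv cw 2)) := by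
  induction k with
  | zero =>
      intro r hk hr ys xs
      rw [PySem.List.pyRange_one_eq_nil (by omega : H ≤ r)]
      have hrH : r = H := by omega
      have hrn : n ≤ r * W := by nlinarith
      have h2 : min n (r * W) = n := by omega
      rw [h2, PySem.List.pyRange_one_eq_nil (le_refl n)]
      simp [pvOuterB]
  | succ k ih =>
      intro r hk hr ys xs
      have hrH : r < H := by push_cast at hk; omega
      have hrw : r * W < n := by nlinarith
      have hmin : min n (r * W) = r * W := by omega
      rw [PySem.List.pyRange_one_cons hrH, hmin, pvOuterB, if_neg (by omega)]
      simp only [pv_inner_spec n W cw ch hW r W.toNat 0 (r * W)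
        (by simp [Int.toNat_of_nonneg hW.le]) (le_refl 0) (by ring) (by omega)]
      have hmin2 : r * W + W = (r + 1) * W := by ring
      rw [hmin2]
      rw [ih (r + 1) (by push_cast at hk ⊢; omega) (by omega)]
      have hle1 : r * W ≤ min n ((r + 1) * W) := by
        refine le_min (by omega) (by nlinarith)
      have hsplit : PySem.List.pyRange (r * W) n 1
          = PySem.List.pyRange (r * W) (min n ((r + 1) * W)) 1
            ++ PySem.List.pyRange (min n ((r + 1) * W)) n 1 :=
        PySem.List.pyRange_one_append (r * W) (min n ((r + 1) * W)) n hle1 (by omega)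
      rw [hsplit]
      simp
  termination_by k

theorem split_canvas2d_py_eq (h w n : Int) (hn : 1 ≤ n) :
    split_canvas2d_py h w n = split_canvas2d_py_alt h w n := by
  simp only [split_canvas2d_py, split_canvas2d_py_alt]
  rw [pv_foldl_pair]
  have hW : (0 : Int) < ((n - 1).toNat.sqrt : Int) + 1 := by positivity
  generalize hWg : ((n - 1).toNat.sqrt : Int) + 1 = W at hW ⊢
  have hHb : (-(PySem.Int.floordiv (-n) W) - 1) * W < n ∧ n ≤ -(PySem.Int.floordiv (-n) W) * W :=
    (PySem.Int.neg_floordiv_neg_eq_iff_of_pos hW).mp rfl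
  generalize hHg : -(PySem.Int.floordiv (-n) W) = H at hHb ⊢
  have hHpos : 0 < H := by nlinarith [hHb.1, hHb.2]
  have hout := pv_outer_spec n W (PySem.Int.floordiv w W) (PySem.Int.floordiv h H) H hW
    hHb.1 hHb.2 H.toNat 0 (by simp [Int.toNat_of_nonneg hHpos.le]) (le_refl 0) [] []
  simp only [zero_mul, min_eq_right (show (0:Int) ≤ n by omega)] at hout
  rw [hout]

-- ===== VERDICT (by name: the statement is the Claim_ definition above) =====
theorem split_canvas2d_py_spec : Claim_equal_split_canvas2d_py := by
  intro h w n _ hpre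
  unfold Spec_split_canvas2d_py
  exact split_canvas2d_py_eq h w n hpre
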